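-- pv_equiv track=rewrite | github.com/JohnDorsey/RelentlessFractals | PureGenTools.py | gen_track_previous_full
-- ===== SOURCE A (Python) =====
-- class ProvisionError(Exception):
--     pass
--
-- class MysteriousError(Exception):
--     # don't catch this. Just identify its cause and replace it with a better exception. and then maybe catch it.
--     pass
--
-- def take_first_and_iter(input_seq):
--     inputGen = iter(input_seq)
--     try:
--         first = next(inputGen)
--     except StopIteration:
--         raise ProvisionError()
--     return (first, inputGen)
--
-- def gen_track_previous_full(input_seq, allow_waste=False):
--     try:
--         previousItem, inputGen = take_first_and_iter(input_seq)
--     except ProvisionError: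
--         raise MysteriousError("can't fill, because there are no items.")
--     try:
--         currentItem = next(inputGen)
--     except StopIteration:
--         if allow_waste:
--             return
--         else:
--             raise MysteriousError("waste would happen, but is not allowed.")
--     yield (previousItem, currentItem)
--     previousItem = currentItem
--     for currentItem in inputGen:
--         yield (previousItem, currentItem)
--         previousItem = currentItem
-- ===== SOURCE B (Python) =====
-- class MysteriousError(Exception):
--     pass
--
-- _SENTINEL = object()
--
-- def gen_track_previous_full(input_seq, allow_waste=False):
--     previousItem = _SENTINEL
--     yielded = False
--     for currentItem in iter(input_seq):
--         if previousItem is _SENTINEL: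
--             previousItem = currentItem
--             continue
--         yield (previousItem, currentItem)
--         yielded = True
--         previousItem = currentItem
--     if previousItem is _SENTINEL:
--         raise MysteriousError("can't fill, because there are no items.")
--     if not yielded and not allow_waste:
--         raise MysteriousError("waste would happen, but is not allowed.")
-- ===== Notes on version B (the rewrite author's own statement) =====
-- stated objective: simpler
-- what changed: Single loop with a sentinel as the initial previous item, replacing the take_first_and_iter helper and the separate first-pair extraction/yield; error checks move after the loop.
import Mathlib
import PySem

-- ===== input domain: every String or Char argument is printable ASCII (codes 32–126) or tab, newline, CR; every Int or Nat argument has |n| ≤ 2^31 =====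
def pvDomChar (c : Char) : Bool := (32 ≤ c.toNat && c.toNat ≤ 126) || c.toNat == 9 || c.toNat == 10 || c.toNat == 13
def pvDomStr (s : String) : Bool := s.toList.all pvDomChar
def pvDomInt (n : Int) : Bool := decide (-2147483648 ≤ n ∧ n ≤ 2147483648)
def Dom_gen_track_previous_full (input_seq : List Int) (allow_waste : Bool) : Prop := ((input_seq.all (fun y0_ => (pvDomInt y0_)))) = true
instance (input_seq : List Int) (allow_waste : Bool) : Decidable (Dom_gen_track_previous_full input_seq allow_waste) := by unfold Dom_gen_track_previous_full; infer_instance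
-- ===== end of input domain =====

-- B replaces the first-item helper and separate first-pair yield with one sentinel-initialised loop (simpler decomposition).


-- ===== PORT A =====
-- A's trailing 'for currentItem in inputGen' loop
def pvALoop (prev : Int) : List Int → List (Int × Int)
  | [] => []
  | c :: rest => (prev, c) :: pvALoop c rest

-- A: take first item (raise if none), take second item (return []/raise per allow_waste),
-- yield the first pair, then loop. Raising cases are excluded by Pre_.
def gen_track_previous_full (input_seq : List Int) (allow_waste : Bool) : List (Int × Int) :=
  match input_seq with
  | [] => []                 -- A raises MysteriousError (excluded by Pre_)
  | [_] => []                -- allow_waste: returns []; otherwise A raises (excluded by Pre_)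
  | a :: b :: rest => (a, b) :: pvALoop b rest

-- ===== PORT B =====
-- B: one loop; 'none' is the sentinel previous item
def pvBLoop (prev : Option Int) : List Int → List (Int × Int)
  | [] => []
  | c :: rest =>
    match prev with
    | none => pvBLoop (some c) rest
    | some p => (p, c) :: pvBLoop (some c) rest

def gen_track_previous_full_alt (input_seq : List Int) (allow_waste : Bool) : List (Int × Int) :=
  pvBLoop none input_seq     -- post-loop error checks only raise, on inputs excluded by Pre_

-- ===== PRECONDITION & SPEC =====
-- Pre_ excludes exactly the inputs where A raises MysteriousError: the empty list,
-- and a one-element list with allow_waste = false.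
def Pre_gen_track_previous_full (input_seq : List Int) (allow_waste : Bool) : Prop :=
  input_seq ≠ [] ∧ (allow_waste = true ∨ 2 ≤ input_seq.length)
instance (input_seq : List Int) (allow_waste : Bool) : Decidable (Pre_gen_track_previous_full input_seq allow_waste) := by unfold Pre_gen_track_previous_full; infer_instance

def pvWitness_gen_track_previous_full : List Int × Bool := ([3, 7, 7], false)

def Spec_gen_track_previous_full (input_seq : List Int) (allow_waste : Bool) (out : List (Int × Int)) : Prop := out = gen_track_previous_full_alt input_seq allow_waste
instance (input_seq : List Int) (allow_waste : Bool) (out : List (Int × Int)) : Decidable (Spec_gen_track_previous_full input_seq allow_waste out) := by unfold Spec_gen_track_previous_full; infer_instance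

-- ===== CLAIM (what is proved, stated in full; the proofs are below) =====
def Claim_equal_gen_track_previous_full : Prop := ∀ (input_seq : List Int) (allow_waste : Bool), Dom_gen_track_previous_full input_seq allow_waste → Pre_gen_track_previous_full input_seq allow_waste → Spec_gen_track_previous_full input_seq allow_waste (gen_track_previous_full input_seq allow_waste)

-- ===== LEMMAS AND PROOFS =====
theorem pvLoop_agree (prev : Int) (xs : List Int) : pvALoop prev xs = pvBLoop (some prev) xs := by
  induction xs generalizing prev with
  | nil => rfl
  | cons c rest ih => simp [pvALoop, pvBLoop, ih]

-- ===== VERDICT (by name: the statement is the Claim_ definition above) =====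
theorem gen_track_previous_full_spec : Claim_equal_gen_track_previous_full := by
  intro input_seq allow_waste _ hpre
  unfold Spec_gen_track_previous_full
  match input_seq with
  | [] => exact absurd rfl hpre.1
  | [_] => rfl
  | a :: b :: rest =>
    simp [gen_track_previous_full, gen_track_previous_full_alt, pvBLoop, pvLoop_agree]
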